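-- pv_equiv track=rewrite | github.com/Devagio/sorting_visualiser | quick.py | get_colour_array
-- ===== SOURCE A (Python) =====
-- def get_colour_array(data_len, head, tail, border, current_index, is_swapping=False):
--     colour_array = []
--     for i in range(data_len):
--         if head <= i <= tail:
--             colour_array.append("gray")
--         else:
--             colour_array.append("white")
--
--         if i == tail:
--             colour_array[i] = "blue"
--         elif i == border:
--             colour_array[i] = "red"
--         elif i == current_index:
--             colour_array[i] = "green"
--
--         if is_swapping:
--             if i == border or i == current_index:
--                 colour_array[i] = "yellow"
--
--     return colour_array
-- ===== SOURCE B (Python) =====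
-- def get_colour_array(data_len, head, tail, border, current_index, is_swapping=False):
--     # background: all white, then the contiguous gray window, then direct writes
--     arr = ["white"] * max(0, data_len)
--     lo = max(0, head)
--     hi = min(data_len - 1, tail)
--     if lo <= hi:
--         arr[lo:hi + 1] = ["gray"] * (hi + 1 - lo)
--
--     def put(idx, colour):
--         if 0 <= idx < data_len:
--             arr[idx] = colour
--
--     if is_swapping:
--         put(tail, "blue")
--         put(border, "yellow")
--         put(current_index, "yellow")
--     else:
--         put(current_index, "green")
--         put(border, "red")
--         put(tail, "blue")
--     return arr
-- ===== Notes on version B (the rewrite author's own statement) =====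
-- stated objective: simpler
-- what changed: Replaces the per-index loop with elif/override chains by a bulk background (all white plus one gray slice assignment) followed by at most three direct indexed writes in an order that makes the last write win.
import Mathlib
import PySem

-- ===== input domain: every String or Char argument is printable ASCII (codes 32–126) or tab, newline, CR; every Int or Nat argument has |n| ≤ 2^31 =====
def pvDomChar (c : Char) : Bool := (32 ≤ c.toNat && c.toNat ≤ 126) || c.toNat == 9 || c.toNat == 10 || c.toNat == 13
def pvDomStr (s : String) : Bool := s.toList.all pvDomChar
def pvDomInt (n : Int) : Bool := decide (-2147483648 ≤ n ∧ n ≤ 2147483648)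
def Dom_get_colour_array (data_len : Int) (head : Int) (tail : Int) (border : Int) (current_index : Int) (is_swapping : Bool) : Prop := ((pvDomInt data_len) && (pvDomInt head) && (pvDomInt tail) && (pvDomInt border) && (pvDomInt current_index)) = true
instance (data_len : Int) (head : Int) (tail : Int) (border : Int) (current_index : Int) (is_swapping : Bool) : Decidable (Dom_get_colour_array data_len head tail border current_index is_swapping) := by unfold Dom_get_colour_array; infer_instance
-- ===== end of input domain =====

-- B builds the colour list as a white background plus one gray slice and at most three
-- indexed writes, instead of A's per-index loop with elif chains (objective: simpler).

-- ===== PORT A =====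
-- colour_array[i] = c : inside the loop i = len(colour_array) - 1 and 0 ≤ i, so List.set i.toNat is exact
def get_colour_array (data_len : Int) (head : Int) (tail : Int) (border : Int) (current_index : Int) (is_swapping : Bool) : List String :=
  (PySem.List.pyRange 0 data_len 1).foldl (fun acc i =>
    let acc := if head ≤ i ∧ i ≤ tail then acc ++ ["gray"] else acc ++ ["white"]
    let acc :=
      if i = tail then acc.set i.toNat "blue"
      else if i = border then acc.set i.toNat "red"
      else if i = current_index then acc.set i.toNat "green"
      else acc
    if is_swapping then
      (if i = border ∨ i = current_index then acc.set i.toNat "yellow" else acc)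
    else acc) []

-- ===== PORT B =====
-- 'if 0 <= idx < data_len: arr[idx] = colour' — idx nonnegative and in range, so List.set idx.toNat is exact
def pvPut (data_len : Int) (arr : List String) (idx : Int) (colour : String) : List String :=
  if 0 ≤ idx ∧ idx < data_len then arr.set idx.toNat colour else arr

def get_colour_array_alt (data_len : Int) (head : Int) (tail : Int) (border : Int) (current_index : Int) (is_swapping : Bool) : List String :=
  let arr := List.replicate (max 0 data_len).toNat "white"
  let lo := max 0 head
  let hi := min (data_len - 1) tail
  -- slice assignment arr[lo:hi+1] = ["gray"]*(hi+1-lo): exact here since 0 ≤ lo ≤ hi < data_len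
  let arr := if lo ≤ hi then
      arr.take lo.toNat ++ List.replicate (hi + 1 - lo).toNat "gray" ++ arr.drop (hi + 1).toNat
    else arr
  if is_swapping then
    pvPut data_len (pvPut data_len (pvPut data_len arr tail "blue") border "yellow") current_index "yellow"
  else
    pvPut data_len (pvPut data_len (pvPut data_len arr current_index "green") border "red") tail "blue"

-- ===== PRECONDITION & SPEC =====
def Spec_get_colour_array (data_len : Int) (head : Int) (tail : Int) (border : Int) (current_index : Int) (is_swapping : Bool) (out : List String) : Prop := out = get_colour_array_alt data_len head tail border current_index is_swapping
instance (data_len : Int) (head : Int) (tail : Int) (border : Int) (current_index : Int) (is_swapping : Bool) (out : List String) : Decidable (Spec_get_colour_array data_len head tail border current_index is_swapping out) := by unfold Spec_get_colour_array; infer_instance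

-- ===== CLAIM (what is proved, stated in full; the proofs are below) =====
def Claim_equal_get_colour_array : Prop := ∀ (data_len : Int) (head : Int) (tail : Int) (border : Int) (current_index : Int) (is_swapping : Bool), Dom_get_colour_array data_len head tail border current_index is_swapping → Spec_get_colour_array data_len head tail border current_index is_swapping (get_colour_array data_len head tail border current_index is_swapping)

-- ===== LEMMAS AND PROOFS =====

/-- the colour A assigns to index `i`, read off from its per-index branches -/
def colourAt (head tail border current_index : Int) (is_swapping : Bool) (i : Int) : String :=
  let base := if head ≤ i ∧ i ≤ tail then "gray" else "white"
  let c :=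
    if i = tail then "blue"
    else if i = border then "red"
    else if i = current_index then "green"
    else base
  if is_swapping ∧ (i = border ∨ i = current_index) then "yellow" else c

theorem set_last_append (acc : List String) (x c : String) :
    (acc ++ [x]).set acc.length c = acc ++ [c] := by
  simp

theorem A_eq_map (data_len head tail border current_index : Int) (is_swapping : Bool) :
    get_colour_array data_len head tail border current_index is_swapping
      = (List.range data_len.toNat).map (fun (k : Nat) => colourAt head tail border current_index is_swapping (k : Int)) := by
  have hrange : PySem.List.pyRange 0 data_len 1 = (List.range data_len.toNat).map (fun (k : Nat) => (k : Int)) := by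
    by_cases hn : 0 ≤ data_len
    · conv_lhs => rw [← Int.toNat_of_nonneg hn]
      exact PySem.List.pyRange_zero_natCast _
    · rw [PySem.List.pyRange_one_eq_nil (by omega)]
      have : data_len.toNat = 0 := by omega
      rw [this]; simp
  unfold get_colour_array
  rw [hrange, List.foldl_map]
  generalize data_len.toNat = N
  induction N with
  | zero => simp
  | succ m ih =>
    rw [List.range_succ, List.foldl_append, List.map_append, ih]
    simp only [List.foldl_cons, List.foldl_nil, List.map_cons, List.map_nil]
    generalize hacc : (List.range m).map (fun (k : Nat) => colourAt head tail border current_index is_swapping (k : Int)) = acc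
    have hl : acc.length = m := by rw [← hacc]; simp
    have key : ∀ (y c : String), (acc ++ [y]).set ((m : Int)).toNat c = acc ++ [c] := by
      intro y c
      have : ((m : Int)).toNat = acc.length := by simp [hl]
      rw [this, set_last_append]
    unfold colourAt
    split_ifs <;> (try simp only [key]) <;> first | rfl | tauto

theorem pvPut_length (n : Int) (arr : List String) (idx : Int) (c : String) :
    (pvPut n arr idx c).length = arr.length := by
  unfold pvPut; split_ifs <;> simp

theorem pvPut_getElem? (n : Int) (arr : List String) (idx : Int) (c : String) (k : Nat)
    (hlen : arr.length = n.toNat) :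
    (pvPut n arr idx c)[k]? = if idx = (k : Int) ∧ k < n.toNat then some c else arr[k]? := by
  unfold pvPut
  split_ifs with h1 h2 h3 <;>
    (try simp only [List.getElem?_set, hlen]) <;>
    (try split_ifs) <;> first | rfl | (exfalso; omega)

theorem bg_length (n head tail : Int) :
    (if max 0 head ≤ min (n - 1) tail then
        (List.replicate (max 0 n).toNat "white").take (max 0 head).toNat ++
          List.replicate (min (n - 1) tail + 1 - max 0 head).toNat "gray" ++
          (List.replicate (max 0 n).toNat "white").drop (min (n - 1) tail + 1).toNat
      else List.replicate (max 0 n).toNat "white").length = n.toNat := by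
  split_ifs <;> (try simp) <;> omega

theorem bg_getElem? (n head tail : Int) (k : Nat) (hk : k < n.toNat) :
    (if max 0 head ≤ min (n - 1) tail then
        (List.replicate (max 0 n).toNat "white").take (max 0 head).toNat ++
          List.replicate (min (n - 1) tail + 1 - max 0 head).toNat "gray" ++
          (List.replicate (max 0 n).toNat "white").drop (min (n - 1) tail + 1).toNat
      else List.replicate (max 0 n).toNat "white")[k]? =
      some (if head ≤ (k : Int) ∧ (k : Int) ≤ tail then "gray" else "white") := by
  simp only [List.take_replicate, List.drop_replicate]
  split_ifs <;>
    simp only [List.getElem?_append, List.length_append, List.getElem?_replicate, List.length_replicate] <;>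
    split_ifs <;> first | rfl | (exfalso; omega)

theorem B_eq_map (data_len head tail border current_index : Int) (is_swapping : Bool) :
    get_colour_array_alt data_len head tail border current_index is_swapping
      = (List.range data_len.toNat).map (fun (k : Nat) => colourAt head tail border current_index is_swapping (k : Int)) := by
  apply List.ext_getElem?
  intro k
  by_cases hk : k < data_len.toNat
  · rw [List.getElem?_map, List.getElem?_range hk]
    simp only [Option.map_some]
    unfold get_colour_array_alt
    have hbg := bg_getElem? data_len head tail k hk
    have hbgl := bg_length data_len head tail
    cases is_swapping <;>
      · simp only [Bool.false_eq_true, if_true, if_false]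
        rw [pvPut_getElem? _ _ _ _ _ (by rw [pvPut_length, pvPut_length]; exact hbgl),
            pvPut_getElem? _ _ _ _ _ (by rw [pvPut_length]; exact hbgl),
            pvPut_getElem? _ _ _ _ _ hbgl, hbg]
        unfold colourAt
        simp only [Bool.false_eq_true, false_and, if_false, true_and]
        split_ifs <;> first | rfl | (exfalso; omega)
  · have h1 : (get_colour_array_alt data_len head tail border current_index is_swapping).length = data_len.toNat := by
      unfold get_colour_array_alt
      cases is_swapping <;>
        simp only [Bool.false_eq_true, if_true, if_false, pvPut_length, bg_length]
    rw [List.getElem?_eq_none (by omega), List.getElem?_eq_none (by simp; omega)]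

-- ===== VERDICT (by name: the statement is the Claim_ definition above) =====
theorem get_colour_array_spec : Claim_equal_get_colour_array := by
  intro n h t b c sw _
  unfold Spec_get_colour_array
  rw [A_eq_map, B_eq_map]
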